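-- pv_equiv track=rewrite | github.com/camcinel/diagnosis-identifier | text_utils.py | contains_category
-- ===== SOURCE A (Python) =====
-- from typing import Tuple
--
-- def contains_category(text: str, category: Tuple[str, ...]) -> str | None:
--     category += tuple([x.upper() for x in category])
--
--     lines = text.split('\n')
--     for index, line in enumerate(lines):
--         for cat in category:
--             if cat in line:
--                 return lines[index + 1].strip()
--     return None
-- ===== SOURCE B (Python) =====
-- def contains_category(text, category):
--     # Search the WHOLE text once per pattern with str.find, take the earliest
--     # occurrence, and recover the line number by counting newlines before it.
--     # Patterns containing '\n' can never occur inside a single line, so drop them.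
--     cats = [c for c in list(category) + [x.upper() for x in category] if '\n' not in c]
--     best = -1
--     for c in cats:
--         p = text.find(c)
--         if p != -1 and (best == -1 or p < best):
--             best = p
--     if best == -1:
--         return None
--     idx = text[:best].count('\n')
--     return text.split('\n')[idx + 1].strip()
-- ===== Notes on version B (the rewrite author's own statement) =====
-- stated objective: alternative
-- what changed: B abandons the line-by-line scan entirely: it runs one whole-text str.find per pattern (dropping patterns containing a newline, which can never occur inside a line), takes the earliest occurrence position, and recovers the answer line by counting newlines before that position.
import Mathlib
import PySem

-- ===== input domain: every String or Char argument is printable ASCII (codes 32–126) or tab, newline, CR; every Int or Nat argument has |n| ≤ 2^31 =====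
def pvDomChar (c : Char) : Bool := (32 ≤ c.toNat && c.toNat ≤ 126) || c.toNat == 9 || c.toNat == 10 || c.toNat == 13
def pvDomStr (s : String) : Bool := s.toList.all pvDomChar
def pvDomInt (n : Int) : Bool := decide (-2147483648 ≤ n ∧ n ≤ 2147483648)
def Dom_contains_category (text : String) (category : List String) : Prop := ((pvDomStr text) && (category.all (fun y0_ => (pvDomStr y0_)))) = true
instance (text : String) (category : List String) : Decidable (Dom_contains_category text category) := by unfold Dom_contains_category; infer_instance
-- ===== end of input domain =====

-- B replaces A's per-line scan by one whole-text str.find per pattern plus a newline count before the earliest hit (alternative algorithm; return value only).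

-- ===== PORT A =====
-- inner 'for cat in category: if cat in line'
def pvMatch (cats : List String) (line : String) : Bool :=
  cats.any (fun c => PySem.Str.isIn c line)

-- category + tuple(x.upper() for x in category)
def pvCats (category : List String) : List String :=
  category ++ category.map PySem.Str.upper

-- text.split('\n'); the separator is non-empty so split? is always `some`
def pvLines (text : String) : List String :=
  (PySem.Str.split? text "\n").getD []

-- outer 'for index, line in enumerate(lines)' with 'return lines[index+1].strip()' on a hit
def pvLoopA (full : List String) (cats : List String) : List String → Nat → Option String
  | [], _ => none
  | l :: rest, i =>
    if pvMatch cats l then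
      (PySem.List.pyGet? full ((i : Int) + 1)).map PySem.Str.strip
    else pvLoopA full cats rest (i + 1)

def contains_category (text : String) (category : List String) : Option String :=
  pvLoopA (pvLines text) (pvCats category) (pvLines text) 0

-- ===== PORT B =====
-- [c for c in list(category) + [x.upper() for x in category] if '\n' not in c]
def pvCatsB (category : List String) : List String :=
  (category ++ category.map PySem.Str.upper).filter (fun c => !PySem.Str.isIn "\n" c)

-- 'for c in cats: p = text.find(c); if p != -1 and (best == -1 or p < best): best = p'
def pvBestLoop (text : String) : List String → Int → Int
  | [], best => best
  | c :: rest, best =>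
    let p := PySem.Str.find text c
    pvBestLoop text rest (if p ≠ -1 ∧ (best = -1 ∨ p < best) then p else best)

def contains_category_alt (text : String) (category : List String) : Option String :=
  let best := pvBestLoop text (pvCatsB category) (-1)
  if best = -1 then none
  else
    let idx := PySem.Str.count (PySem.Str.slice text none (some best)) "\n"
    (PySem.List.pyGet? (pvLines text) ((idx : Int) + 1)).map PySem.Str.strip

-- ===== PRECONDITION & SPEC =====
-- Pre_ excludes exactly the inputs on which A (and B alike) raises IndexError: those where
-- the first line containing a category substring is the last line of the text.
def Pre_contains_category (text : String) (category : List String) : Prop :=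
  ((pvLines text).dropLast.any (pvMatch (pvCats category)) || !((pvLines text).any (pvMatch (pvCats category)))) = true
instance (text : String) (category : List String) : Decidable (Pre_contains_category text category) := by unfold Pre_contains_category; infer_instance

def pvWitness_contains_category : String × List String := ("head\nnext line ", ["head"])

def Spec_contains_category (text : String) (category : List String) (out : Option String) : Prop := out = contains_category_alt text category
instance (text : String) (category : List String) (out : Option String) : Decidable (Spec_contains_category text category out) := by unfold Spec_contains_category; infer_instance

-- ===== CLAIM (what is proved, stated in full; the proofs are below) =====
def Claim_equal_contains_category : Prop := ∀ (text : String) (category : List String), Dom_contains_category text category → Pre_contains_category text category → Spec_contains_category text category (contains_category text category)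

-- ===== LEMMAS AND PROOFS =====

-- structural model of text.split('\n') on the character level
def nlSplit : List Char → List (List Char)
  | [] => [[]]
  | c :: t =>
    if c = '\n' then [] :: nlSplit t
    else
      match nlSplit t with
      | [] => [[c]]
      | f :: r => (c :: f) :: r

-- abstract form of A's scan: first line containing some pattern, then the next line
def midC (cats : List (List Char)) : List (List Char) → Option (List Char)
  | [] => none
  | l :: rest =>
    if cats.any (fun c => PySem.Chars.isIn c l) then rest.head?.map PySem.Chars.strip
    else midC cats rest

-- char-level form of B's min-position fold
def bestStep (s : List Char) (best : Int) (c : List Char) : Int :=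
  let p := PySem.Chars.find s c
  if p ≠ -1 ∧ (best = -1 ∨ p < best) then p else best

def bestC (s : List Char) (cats : List (List Char)) (init : Int) : Int :=
  cats.foldl (bestStep s) init

-- char-level form of B's body
def bCore (cats : List (List Char)) (cs : List Char) : Option (List Char) :=
  let best := bestC cs cats (-1)
  if best = -1 then none
  else (PySem.List.pyGet? (nlSplit cs) (((cs.take best.toNat).count '\n' : Int) + 1)).map PySem.Chars.strip

-- string-level abstract A scan
def midS (cats : List String) : List String → Option String
  | [] => none
  | l :: rest => if pvMatch cats l then rest.head?.map PySem.Str.strip else midS cats rest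

lemma nlSplit_ne_nil (cs : List Char) : nlSplit cs ≠ [] := by
  cases cs with
  | nil => simp [nlSplit]
  | cons c t =>
    simp only [nlSplit]
    split
    · simp
    · cases h2 : nlSplit t <;> simp

lemma nlSplit_no_nl (cs : List Char) (h : '\n' ∉ cs) : nlSplit cs = [cs] := by
  induction cs with
  | nil => rfl
  | cons c t ih =>
    simp only [List.mem_cons, not_or] at h
    simp only [nlSplit, if_neg (Ne.symm h.1), ih h.2]

lemma nlSplit_append (line rest : List Char) (h : '\n' ∉ line) :
    nlSplit (line ++ '\n' :: rest) = line :: nlSplit rest := by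
  induction line with
  | nil => simp [nlSplit]
  | cons c l ih =>
    simp only [List.mem_cons, not_or] at h
    simp only [List.cons_append, nlSplit, if_neg (Ne.symm h.1), ih h.2]

lemma mem_nlSplit_no_nl (cs l : List Char) (h : l ∈ nlSplit cs) : '\n' ∉ l := by
  induction cs generalizing l with
  | nil =>
    simp only [nlSplit, List.mem_singleton] at h
    simp [h]
  | cons c t ih =>
    simp only [nlSplit] at h
    by_cases hc : c = '\n'
    · rw [if_pos hc] at h
      rcases List.mem_cons.mp h with h1 | h1
      · simp [h1]
      · exact ih l h1
    · rw [if_neg hc] at h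
      cases h2 : nlSplit t with
      | nil => exact absurd h2 (nlSplit_ne_nil t)
      | cons f r =>
        rw [h2] at h
        rcases List.mem_cons.mp h with h1 | h1
        · subst h1
          have hf : '\n' ∉ f := ih f (h2 ▸ List.mem_cons_self)
          simp only [List.mem_cons, not_or]
          exact ⟨Ne.symm hc, hf⟩
        · exact ih l (h2 ▸ List.mem_cons_of_mem f h1)

lemma splitOn_go_eq (fuel : Nat) : ∀ (l cur : List Char) (accs : List (List Char)),
    l.length < fuel →
    PySem.Chars.splitOn.go ['\n'] fuel l cur accs =
      accs.reverse ++ (cur.reverse ++ (nlSplit l).headI) :: (nlSplit l).tail := by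
  induction fuel with
  | zero => intro l cur accs h; omega
  | succ f ihf =>
    intro l cur accs h
    cases l with
    | nil =>
      simp [PySem.Chars.splitOn.go, nlSplit]
    | cons c t =>
      have hpre : List.isPrefixOf ['\n'] (c :: t) = ('\n' == c) := by
        simp [List.isPrefixOf]
      by_cases hc : c = '\n'
      · subst hc
        have hstep : PySem.Chars.splitOn.go ['\n'] (f + 1) ('\n' :: t) cur accs =
            PySem.Chars.splitOn.go ['\n'] f t [] (cur.reverse :: accs) := by
          simp [PySem.Chars.splitOn.go, hpre]
        rw [hstep, ihf t [] (cur.reverse :: accs) (by simpa using Nat.lt_of_succ_lt_succ h)]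
        have hne := nlSplit_ne_nil t
        cases ht : nlSplit t with
        | nil => exact absurd ht hne
        | cons a r => simp [nlSplit, ht]
      · have hstep : PySem.Chars.splitOn.go ['\n'] (f + 1) (c :: t) cur accs =
            PySem.Chars.splitOn.go ['\n'] f t (c :: cur) accs := by
          simp [PySem.Chars.splitOn.go, hpre, Ne.symm hc]
        rw [hstep, ihf t (c :: cur) accs (by simpa using Nat.lt_of_succ_lt_succ h)]
        have hne := nlSplit_ne_nil t
        cases ht : nlSplit t with
        | nil => exact absurd ht hne
        | cons a r => simp [nlSplit, ht, hc]

lemma splitOn_eq_nlSplit (cs : List Char) : PySem.Chars.splitOn cs ['\n'] = nlSplit cs := by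
  unfold PySem.Chars.splitOn
  rw [splitOn_go_eq (cs.length + 1) cs [] [] (by omega)]
  have hne := nlSplit_ne_nil cs
  cases h : nlSplit cs with
  | nil => exact absurd h hne
  | cons a r => simp

lemma count_go_eq (ch : Char) (fuel : Nat) : ∀ (l : List Char) (acc : Nat),
    l.length ≤ fuel → PySem.Chars.count.go [ch] fuel l acc = acc + l.count ch := by
  induction fuel with
  | zero =>
    intro l acc h
    have : l = [] := List.length_eq_zero_iff.mp (Nat.le_zero.mp h)
    subst this
    simp [PySem.Chars.count.go]
  | succ f ihf =>
    intro l acc h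
    cases l with
    | nil => simp [PySem.Chars.count.go]
    | cons c t =>
      have hpre : List.isPrefixOf [ch] (c :: t) = (ch == c) := by
        simp [List.isPrefixOf]
      by_cases hc : ch = c
      · subst hc
        have hstep : PySem.Chars.count.go [ch] (f + 1) (ch :: t) acc =
            PySem.Chars.count.go [ch] f t (acc + 1) := by
          simp [PySem.Chars.count.go, hpre]
        rw [hstep, ihf t (acc + 1) (by simpa using Nat.le_of_succ_le_succ h)]
        simp
        omega
      · have hstep : PySem.Chars.count.go [ch] (f + 1) (c :: t) acc =
            PySem.Chars.count.go [ch] f t acc := by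
          simp [PySem.Chars.count.go, hpre, hc]
        rw [hstep, ihf t acc (by simpa using Nat.le_of_succ_le_succ h)]
        simp [Ne.symm hc]

lemma count_single (cs : List Char) (ch : Char) : PySem.Chars.count cs [ch] = cs.count ch := by
  unfold PySem.Chars.count
  rw [if_neg (by simp)]
  simpa using count_go_eq ch cs.length cs 0 le_rfl

-- find points at p iff p is an occurrence with none before it
lemma find_eq_of (s c : List Char) (p : Nat) (h1 : c <+: s.drop p)
    (h2 : ∀ i < p, ¬ c <+: s.drop i) : PySem.Chars.find s c = (p : Int) := by
  have hin : PySem.Chars.isIn c s = true :=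
    (PySem.Chars.exists_prefix_drop_iff_isIn c s).mp ⟨p, h1⟩
  have hnn : 0 ≤ PySem.Chars.find s c :=
    (PySem.Chars.find_nonneg_iff s c).mpr ((PySem.Chars.isIn_iff_infix c s).mp hin)
  obtain ⟨hpre, hmin⟩ := PySem.Chars.find_spec hnn
  rcases lt_trichotomy (PySem.Chars.find s c).toNat p with hlt | heq | hgt
  · exact absurd hpre (h2 _ hlt)
  · rw [← heq, Int.toNat_of_nonneg hnn]
  · exact absurd h1 (hmin p hgt)

-- a '\n'-free prefix of a ++ '\n' :: b is a prefix of a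
lemma prefix_no_nl (w a b : List Char) (hn : '\n' ∉ w) (hc : w <+: a ++ '\n' :: b) :
    w <+: a := by
  have hc' : w = (a ++ '\n' :: b).take w.length := List.prefix_iff_eq_take.mp hc
  by_cases hlen : w.length ≤ a.length
  · rw [List.take_append_of_le_length hlen] at hc'
    rw [hc']
    exact List.take_prefix _ _
  · exfalso
    apply hn
    have hlt : a.length < w.length := lt_of_not_ge hlen
    have hget : w[a.length]? = some '\n' := by
      rw [hc', List.getElem?_take, if_pos hlt]
      rw [List.getElem?_append_right le_rfl]
      simp
    exact List.mem_of_getElem? hget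

-- find on line ++ '\n' :: rest decomposes for '\n'-free patterns
lemma find_append (line rest c : List Char) (hn : '\n' ∉ c) :
    PySem.Chars.find (line ++ '\n' :: rest) c =
      if PySem.Chars.isIn c line then PySem.Chars.find line c
      else if PySem.Chars.find rest c = -1 then -1
      else (line.length : Int) + 1 + PySem.Chars.find rest c := by
  by_cases h1 : PySem.Chars.isIn c line = true
  · rw [if_pos h1]
    have hq0 : 0 ≤ PySem.Chars.find line c :=
      (PySem.Chars.find_nonneg_iff line c).mpr ((PySem.Chars.isIn_iff_infix c line).mp h1)
    obtain ⟨hpre, hmin⟩ := PySem.Chars.find_spec hq0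
    have hqle : (PySem.Chars.find line c).toNat ≤ line.length := by
      have := PySem.Chars.find_le_length line c
      omega
    have heq : PySem.Chars.find (line ++ '\n' :: rest) c =
        ((PySem.Chars.find line c).toNat : Int) := by
      apply find_eq_of
      · rw [List.drop_append_of_le_length hqle]
        exact hpre.trans (List.prefix_append _ _)
      · intro i hi hcp
        rw [List.drop_append_of_le_length (by omega)] at hcp
        exact hmin i hi (prefix_no_nl c _ _ hn hcp)
    rw [heq, Int.toNat_of_nonneg hq0]
  · rw [if_neg h1]
    have h1' : PySem.Chars.isIn c line = false := by simpa using h1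
    have hline_of : ∀ j, j ≤ line.length → c <+: (line ++ '\n' :: rest).drop j → False := by
      intro j hjle hcp
      rw [List.drop_append_of_le_length hjle] at hcp
      have hpl : c <+: line.drop j := prefix_no_nl c _ _ hn hcp
      have : PySem.Chars.isIn c line = true :=
        (PySem.Chars.isIn_iff_infix c line).mpr
          (hpl.isInfix.trans (List.drop_suffix j line).isInfix)
      rw [h1'] at this
      cases this
    have hdrop_big : ∀ j, line.length < j →
        (line ++ '\n' :: rest).drop j = rest.drop (j - line.length - 1) := by
      intro j hj
      rw [List.drop_append, List.drop_eq_nil_of_le (by omega), List.nil_append]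
      generalize hk : j - line.length - 1 = k
      have : j - line.length = k + 1 := by omega
      rw [this, List.drop_succ_cons]
    by_cases h2 : PySem.Chars.find rest c = -1
    · rw [if_pos h2]
      rw [PySem.Chars.find_eq_neg_one_iff]
      intro hinf
      obtain ⟨j, hj⟩ := (PySem.Chars.exists_prefix_drop_iff_isIn c _).mpr
        ((PySem.Chars.isIn_iff_infix c _).mpr hinf)
      by_cases hjle : j ≤ line.length
      · exact hline_of j hjle hj
      · rw [hdrop_big j (by omega)] at hj
        have : PySem.Chars.isIn c rest = true :=
          (PySem.Chars.exists_prefix_drop_iff_isIn c rest).mp ⟨_, hj⟩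
        have hne : PySem.Chars.find rest c ≠ -1 := by
          rw [PySem.Chars.find_ne_neg_one_iff]
          exact (PySem.Chars.isIn_iff_infix c rest).mp this
        exact hne h2
    · rw [if_neg h2]
      have hq0 : 0 ≤ PySem.Chars.find rest c := by
        have := PySem.Chars.neg_one_le_find rest c
        omega
      obtain ⟨hpre, hmin⟩ := PySem.Chars.find_spec hq0
      have heq : PySem.Chars.find (line ++ '\n' :: rest) c =
          ((line.length + 1 + (PySem.Chars.find rest c).toNat : Nat) : Int) := by
        apply find_eq_of
        · rw [hdrop_big _ (by omega)]
          have : line.length + 1 + (PySem.Chars.find rest c).toNat - line.length - 1 =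
              (PySem.Chars.find rest c).toNat := by omega
          rw [this]
          exact hpre
        · intro i hi hcp
          by_cases hile : i ≤ line.length
          · exact hline_of i hile hcp
          · rw [hdrop_big i (by omega)] at hcp
            exact hmin (i - line.length - 1) (by omega) hcp
      rw [heq]
      push_cast [Int.toNat_of_nonneg hq0]
      ring

-- the fold computes the minimal occurrence position (or -1)
lemma bestC_spec (s : List Char) (cats : List (List Char)) :
    (bestC s cats (-1) = -1 ∧ ∀ c ∈ cats, PySem.Chars.find s c = -1) ∨
    (0 ≤ bestC s cats (-1) ∧ (∃ c ∈ cats, bestC s cats (-1) = PySem.Chars.find s c) ∧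
      ∀ c ∈ cats, PySem.Chars.find s c = -1 ∨ bestC s cats (-1) ≤ PySem.Chars.find s c) := by
  induction cats using List.reverseRecOn with
  | nil => exact Or.inl ⟨rfl, by simp⟩
  | append_singleton l c ih =>
    have hfold : bestC s (l ++ [c]) (-1) = bestStep s (bestC s l (-1)) c := by
      simp [bestC, List.foldl_append]
    have hp := PySem.Chars.neg_one_le_find s c
    rw [hfold]
    rcases ih with ⟨hq, hall⟩ | ⟨hq0, ⟨c0, hc0, hwc0⟩, hmin⟩
    · by_cases hpe : PySem.Chars.find s c = -1
      · left
        refine ⟨by simp [bestStep, hpe, hq], ?_⟩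
        intro c' hc'
        rcases List.mem_append.mp hc' with h | h
        · exact hall c' h
        · rw [List.mem_singleton.mp h]; exact hpe
      · right
        have hstep : bestStep s (bestC s l (-1)) c = PySem.Chars.find s c := by
          simp [bestStep, hpe, hq]
        rw [hstep]
        refine ⟨by omega, ⟨c, by simp, rfl⟩, ?_⟩
        intro c' hc'
        rcases List.mem_append.mp hc' with h | h
        · exact Or.inl (hall c' h)
        · rw [List.mem_singleton.mp h]; exact Or.inr le_rfl
    · by_cases hpe : PySem.Chars.find s c = -1
      · have hstep : bestStep s (bestC s l (-1)) c = bestC s l (-1) := by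
          simp [bestStep, hpe]
        rw [hstep]
        right
        refine ⟨hq0, ⟨c0, List.mem_append_left _ hc0, hwc0⟩, ?_⟩
        intro c' hc'
        rcases List.mem_append.mp hc' with h | h
        · exact hmin c' h
        · rw [List.mem_singleton.mp h]; exact Or.inl hpe
      · by_cases hlt : PySem.Chars.find s c < bestC s l (-1)
        · have hstep : bestStep s (bestC s l (-1)) c = PySem.Chars.find s c := by
            simp only [bestStep]
            rw [if_pos ⟨hpe, Or.inr hlt⟩]
          rw [hstep]
          right
          refine ⟨by omega, ⟨c, by simp, rfl⟩, ?_⟩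
          intro c' hc'
          rcases List.mem_append.mp hc' with h | h
          · rcases hmin c' h with h1 | h1
            · exact Or.inl h1
            · exact Or.inr (by omega)
          · rw [List.mem_singleton.mp h]; exact Or.inr le_rfl
        · have hstep : bestStep s (bestC s l (-1)) c = bestC s l (-1) := by
            simp only [bestStep]
            rw [if_neg]
            rintro ⟨hne, h2 | h2⟩
            · omega
            · exact hlt h2
          rw [hstep]
          right
          refine ⟨hq0, ⟨c0, List.mem_append_left _ hc0, hwc0⟩, ?_⟩
          intro c' hc'
          rcases List.mem_append.mp hc' with h | h
          · exact hmin c' h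
          · rw [List.mem_singleton.mp h]; right; omega

-- shifting the whole fold past 'line ++ \n'
lemma bestC_shift (line rest : List Char) :
    ∀ cats : List (List Char),
      (∀ c ∈ cats, PySem.Chars.find (line ++ '\n' :: rest) c =
        if PySem.Chars.find rest c = -1 then -1
        else (line.length : Int) + 1 + PySem.Chars.find rest c) →
    ∀ b : Int, -1 ≤ b →
      bestC (line ++ '\n' :: rest) cats (if b = -1 then -1 else (line.length : Int) + 1 + b) =
        (if bestC rest cats b = -1 then -1 else (line.length : Int) + 1 + bestC rest cats b) := by
  intro cats
  induction cats with
  | nil => intro _ b _; rfl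
  | cons c cats' ih =>
    intro hc b hb
    have hcc := hc c List.mem_cons_self
    have hc' := fun c' h => hc c' (List.mem_cons_of_mem c h)
    have hpr := PySem.Chars.neg_one_le_find rest c
    have hstep : bestStep (line ++ '\n' :: rest) (if b = -1 then -1 else (line.length : Int) + 1 + b) c =
        (if bestStep rest b c = -1 then -1 else (line.length : Int) + 1 + bestStep rest b c) := by
      simp only [bestStep, hcc]
      split_ifs <;> omega
    have hinv : -1 ≤ bestStep rest b c := by
      simp only [bestStep]
      split_ifs <;> omega
    simp only [bestC, List.foldl_cons] at *
    rw [hstep]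
    exact ih hc' _ hinv

lemma pyGet?_cons_nat {α : Type} (x : α) (xs : List α) (n : Nat) :
    PySem.List.pyGet? (x :: xs) ((n : Int) + 1) = PySem.List.pyGet? xs (n : Int) := by
  have h1 : ((n : Int) + 1) = ((n + 1 : Nat) : Int) := by push_cast; ring
  rw [h1, PySem.List.pyGet?_natCast, PySem.List.pyGet?_natCast, List.getElem?_cons_succ]

lemma nl_decomp (cs : List Char) (h : '\n' ∈ cs) :
    ∃ line rest, cs = line ++ '\n' :: rest ∧ '\n' ∉ line := by
  have hsplit := List.takeWhile_append_dropWhile (p := fun c => c != '\n') (l := cs)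
  have hdne : cs.dropWhile (fun c => c != '\n') ≠ [] := by
    intro hnil
    rw [List.dropWhile_eq_nil_iff] at hnil
    have := hnil '\n' h
    simp at this
  obtain ⟨d, t, hdt⟩ := List.exists_cons_of_ne_nil hdne
  have hd : d = '\n' := by
    have hh := List.head_dropWhile_not (fun c => c != '\n') hdne
    have h2 : (cs.dropWhile (fun c => c != '\n')).head? = some d := by rw [hdt]; rfl
    have h3 := List.head?_eq_some_head (l := cs.dropWhile (fun c => c != '\n')) hdne
    rw [h2] at h3
    have h4 : (cs.dropWhile (fun c => c != '\n')).head hdne = d := (Option.some.inj h3).symm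
    rw [h4] at hh
    simpa using hh
  refine ⟨cs.takeWhile (fun c => c != '\n'), t, ?_, ?_⟩
  · conv_lhs => rw [← hsplit]
    rw [hdt, hd]
  · intro hm
    have := List.mem_takeWhile_imp hm
    simp at this

-- B's body equals A's abstract scan on a '\n'-free text: both give none
lemma bCore_no_nl (cats : List (List Char)) (cs : List Char) (h : '\n' ∉ cs) :
    bCore cats cs = midC cats (nlSplit cs) := by
  rw [nlSplit_no_nl cs h]
  have hmid : midC cats [cs] = none := by
    simp only [midC]
    split <;> simp
  rw [hmid]
  simp only [bCore]
  by_cases hb : bestC cs cats (-1) = -1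
  · rw [if_pos hb]
  · rw [if_neg hb]
    have hcount : ((cs.take (bestC cs cats (-1)).toNat).count '\n') = 0 := by
      rw [List.count_eq_zero]
      intro hm
      exact h (List.mem_of_mem_take hm)
    rw [hcount, nlSplit_no_nl cs h]
    rw [pyGet?_cons_nat cs [] 0, PySem.List.pyGet?_natCast]
    rfl

-- the heart: B's char-level body equals A's abstract scan over the split lines
lemma bCore_eq_midC (cats : List (List Char)) (hcats : ∀ c ∈ cats, '\n' ∉ c) :
    ∀ cs : List Char, bCore cats cs = midC cats (nlSplit cs) := by
  suffices h : ∀ (n : Nat) (cs : List Char), cs.length ≤ n → bCore cats cs = midC cats (nlSplit cs) by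
    exact fun cs => h cs.length cs le_rfl
  intro n
  induction n with
  | zero =>
    intro cs hlen
    have hnil : cs = [] := List.length_eq_zero_iff.mp (Nat.le_zero.mp hlen)
    subst hnil
    exact bCore_no_nl cats [] (by simp)
  | succ n ihn =>
    intro cs hlen
    by_cases hnl : '\n' ∈ cs
    · obtain ⟨line, rest, hdec, hline⟩ := nl_decomp cs hnl
      subst hdec
      have hrlen : rest.length ≤ n := by
        simp only [List.length_append, List.length_cons] at hlen
        omega
      rw [nlSplit_append line rest hline]
      by_cases hmatch : cats.any (fun c => PySem.Chars.isIn c line) = true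
      · -- some pattern occurs in the first line: both return the stripped second line
        obtain ⟨c1, hc1, hcl1⟩ := List.any_eq_true.mp hmatch
        have hinline : PySem.Chars.isIn c1 (line ++ '\n' :: rest) = true := by
          rw [PySem.Chars.isIn_iff_infix] at hcl1 ⊢
          exact hcl1.trans (List.prefix_append line _).isInfix
        have hfind1 : PySem.Chars.find (line ++ '\n' :: rest) c1 ≠ -1 := by
          rw [PySem.Chars.find_ne_neg_one_iff]
          exact (PySem.Chars.isIn_iff_infix _ _).mp hinline
        rcases bestC_spec (line ++ '\n' :: rest) cats with ⟨_, hall⟩ | ⟨hb0, _, hmin⟩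
        · exact absurd (hall c1 hc1) hfind1
        · have hBle : bestC (line ++ '\n' :: rest) cats (-1) ≤ (line.length : Int) := by
            rcases hmin c1 hc1 with h | h
            · exact absurd h hfind1
            · have hfl : PySem.Chars.find (line ++ '\n' :: rest) c1 = PySem.Chars.find line c1 := by
                rw [find_append line rest c1 (hcats c1 hc1), if_pos hcl1]
              have hle := PySem.Chars.find_le_length line c1
              omega
          simp only [bCore]
          rw [if_neg (by omega), nlSplit_append line rest hline]
          have hcount : (((line ++ '\n' :: rest).take (bestC (line ++ '\n' :: rest) cats (-1)).toNat).count '\n') = 0 := by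
            rw [List.take_append_of_le_length (by omega), List.count_eq_zero]
            intro hm
            exact hline (List.mem_of_mem_take hm)
          rw [hcount]
          rw [pyGet?_cons_nat line (nlSplit rest) 0, PySem.List.pyGet?_natCast]
          simp only [midC, if_pos hmatch, List.head?_eq_getElem?]
      · -- no pattern in the first line: reduce to the remaining text
        have hmatch' : cats.any (fun c => PySem.Chars.isIn c line) = false := by
          simpa using hmatch
        have hfa := List.any_eq_false.mp hmatch'
        have hfind : ∀ c ∈ cats, PySem.Chars.find (line ++ '\n' :: rest) c =
            if PySem.Chars.find rest c = -1 then -1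
            else (line.length : Int) + 1 + PySem.Chars.find rest c := by
          intro c hcm
          rw [find_append line rest c (hcats c hcm), if_neg (by simpa using hfa c hcm)]
        have hshift := bestC_shift line rest cats hfind (-1) le_rfl
        rw [if_pos rfl] at hshift
        have hmid : midC cats (line :: nlSplit rest) = midC cats (nlSplit rest) := by
          simp only [midC, hmatch', Bool.false_eq_true, if_false]
        rw [hmid, ← ihn rest hrlen]
        rcases bestC_spec rest cats with ⟨hbr, _⟩ | ⟨hbr0, _, _⟩
        · have hBigB : bestC (line ++ '\n' :: rest) cats (-1) = -1 := by
            rw [hshift, if_pos hbr]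
          simp only [bCore]
          rw [if_pos hBigB, if_pos hbr]
        · have hqne : bestC rest cats (-1) ≠ -1 := by omega
          have hBigB : bestC (line ++ '\n' :: rest) cats (-1) =
              (line.length : Int) + 1 + bestC rest cats (-1) := by
            rw [hshift, if_neg hqne]
          simp only [bCore]
          rw [if_neg (by omega), if_neg hqne, hBigB]
          have htoNat : ((line.length : Int) + 1 + bestC rest cats (-1)).toNat =
              line.length + (1 + (bestC rest cats (-1)).toNat) := by omega
          have htake : (line ++ '\n' :: rest).take (line.length + (1 + (bestC rest cats (-1)).toNat)) =
              line ++ '\n' :: rest.take (bestC rest cats (-1)).toNat := by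
            rw [List.take_append]
            congr 1
            · rw [List.take_of_length_le (by omega)]
            · have h2 : line.length + (1 + (bestC rest cats (-1)).toNat) - line.length =
                  (bestC rest cats (-1)).toNat + 1 := by omega
              rw [h2, List.take_succ_cons]
          rw [htoNat, htake]
          have hcount : ((line ++ '\n' :: rest.take (bestC rest cats (-1)).toNat).count '\n') =
              ((rest.take (bestC rest cats (-1)).toNat).count '\n') + 1 := by
            rw [List.count_append, List.count_cons]
            have : line.count '\n' = 0 := List.count_eq_zero.mpr hline
            simp [this]
          rw [hcount, nlSplit_append line rest hline]
          rw [pyGet?_cons_nat line (nlSplit rest) ((rest.take (bestC rest cats (-1)).toNat).count '\n' + 1)]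
          norm_cast
    · exact bCore_no_nl cats cs hnl

-- A's indexed loop is the abstract scan
lemma loopA_eq_midS (cats full : List String) :
    ∀ (ls : List String) (i : Nat), full.drop i = ls →
      pvLoopA full cats ls i = midS cats ls := by
  intro ls
  induction ls with
  | nil => intro i _; simp [pvLoopA, midS]
  | cons l rest ih =>
    intro i hdrop
    by_cases hm : pvMatch cats l = true
    · have hget : PySem.List.pyGet? full ((i : Int) + 1) = rest.head? := by
        have h1 : ((i : Int) + 1) = ((i + 1 : Nat) : Int) := by push_cast; ring
        rw [h1, PySem.List.pyGet?_natCast]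
        have : full[i + 1]? = (full.drop i)[1]? := by
          rw [List.getElem?_drop]
        rw [this, hdrop]
        cases rest <;> simp
      simp [pvLoopA, midS, hm, hget]
    · have hm' : pvMatch cats l = false := by simpa using hm
      have hdrop' : full.drop (i + 1) = rest := by
        have : full.drop (i + 1) = (full.drop i).drop 1 := by rw [List.drop_drop]
        rw [this, hdrop]; rfl
      simp only [pvLoopA, midS, hm', Bool.false_eq_true, if_false]
      exact ih (i + 1) hdrop'

-- string scan = char scan
lemma midS_eq_midC (cats : List String) :
    ∀ ls : List String,
      midS cats ls = (midC (cats.map String.toList) (ls.map String.toList)).map String.ofList := by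
  intro ls
  induction ls with
  | nil => simp [midS, midC]
  | cons l rest ih =>
    have hm : pvMatch cats l = (cats.map String.toList).any (fun c => PySem.Chars.isIn c l.toList) := by
      simp [pvMatch, List.any_map, Function.comp_def]
    simp only [midS, midC, List.map_cons, ← hm]
    by_cases h : pvMatch cats l = true
    · simp only [if_pos h]
      cases rest with
      | nil => simp
      | cons r t =>
        simp only [List.map_cons, List.head?_cons, Option.map_some]
        rw [← PySem.Str.toList_strip, String.ofList_toList]
    · have h' : pvMatch cats l = false := by simpa using h
      simp only [h', Bool.false_eq_true, if_false]
      exact ih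

-- dropping '\n'-patterns does not change the scan over '\n'-free lines
lemma midC_filter (cats : List (List Char)) :
    ∀ L : List (List Char), (∀ l ∈ L, '\n' ∉ l) →
      midC cats L = midC (cats.filter (fun c => decide ('\n' ∉ c))) L := by
  intro L
  induction L with
  | nil => intro _; rfl
  | cons l rest ih =>
    intro hfree
    have hl : '\n' ∉ l := hfree l List.mem_cons_self
    have hany : cats.any (fun c => PySem.Chars.isIn c l) =
        (cats.filter (fun c => decide ('\n' ∉ c))).any (fun c => PySem.Chars.isIn c l) := by
      rcases hin : cats.any (fun c => PySem.Chars.isIn c l) with _ | _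
      · symm
        rw [List.any_eq_false] at hin ⊢
        intro c hc
        exact hin c (List.mem_of_mem_filter hc)
      · symm
        rw [List.any_eq_true] at hin ⊢
        obtain ⟨c, hc, hcl⟩ := hin
        refine ⟨c, List.mem_filter.mpr ⟨hc, ?_⟩, hcl⟩
        have hcsub : c ⊆ l := ((PySem.Chars.isIn_iff_infix c l).mp hcl).subset
        simp only [decide_eq_true_eq]
        intro hmem
        exact hl (hcsub hmem)
    simp only [midC, hany]
    split
    · rfl
    · exact ih (fun x hx => hfree x (List.mem_cons_of_mem l hx))

lemma pyGet?_map_ofList (l : List (List Char)) (i : Int) :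
    PySem.List.pyGet? (l.map String.ofList) i = (PySem.List.pyGet? l i).map String.ofList := by
  simp only [PySem.List.pyGet?, List.length_map]
  cases PySem.List.pyIdx? l.length i <;> simp

-- B's port equals the char-level body
lemma pvBestLoop_eq_bestC (text : String) :
    ∀ (cats : List String) (b : Int),
      pvBestLoop text cats b = bestC text.toList (cats.map String.toList) b := by
  intro cats
  induction cats with
  | nil => intro b; rfl
  | cons c rest ih =>
    intro b
    simp only [pvBestLoop, bestC, List.map_cons, List.foldl_cons, bestStep,
      PySem.Str.find_eq]
    exact ih _

lemma lines_eq (text : String) : pvLines text = (nlSplit text.toList).map String.ofList := by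
  have hb := PySem.Str.split?_map text "\n"
  have hnl : "\n".toList = ['\n'] := by decide
  rw [hnl] at hb
  have hsplit : PySem.Chars.split? text.toList ['\n'] =
      some (PySem.Chars.splitOn text.toList ['\n']) := by
    simp [PySem.Chars.split?]
  rw [hsplit] at hb
  cases hs : PySem.Str.split? text "\n" with
  | none => rw [hs] at hb; cases hb
  | some ls =>
    rw [hs] at hb
    simp only [Option.map_some, Option.some_inj] at hb
    have hls : ls.map String.toList = nlSplit text.toList := by
      rw [hb, splitOn_eq_nlSplit]
    unfold pvLines
    rw [hs]
    simp only [Option.getD_some]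
    rw [← hls, List.map_map]
    simp [Function.comp_def]

lemma catsB_toList (category : List String) :
    (pvCatsB category).map String.toList =
      ((pvCats category).map String.toList).filter (fun c => decide ('\n' ∉ c)) := by
  unfold pvCatsB pvCats
  rw [List.filter_map]
  congr 1
  apply List.filter_congr
  intro c _
  have : "\n".toList = ['\n'] := by decide
  simp only [PySem.Str.isIn_eq, this, Function.comp_apply]
  rcases h : PySem.Chars.isIn ['\n'] c.toList with _ | _
  · have hmem : '\n' ∉ c.toList := by
      intro hm
      have : PySem.Chars.isIn ['\n'] c.toList = true :=
        (PySem.Chars.isIn_iff_infix _ _).mpr ((List.singleton_infix_iff _ _).mpr hm)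
      rw [h] at this
      cases this
    simp [hmem]
  · have hmem : '\n' ∈ c.toList :=
      (List.singleton_infix_iff _ _).mp ((PySem.Chars.isIn_iff_infix _ _).mp h)
    simp [hmem]

lemma strip_ofList (l : List Char) :
    PySem.Str.strip (String.ofList l) = String.ofList (PySem.Chars.strip l) := by
  conv_lhs => rw [← String.ofList_toList (s := PySem.Str.strip (String.ofList l))]
  rw [PySem.Str.toList_strip, String.toList_ofList]

lemma alt_eq_bCore (text : String) (category : List String) :
    contains_category_alt text category =
      (bCore (((pvCats category).map String.toList).filter (fun c => decide ('\n' ∉ c))) text.toList).map String.ofList := by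
  have hcats : (pvCatsB category).map String.toList =
      ((pvCats category).map String.toList).filter (fun c => decide ('\n' ∉ c)) := catsB_toList category
  simp only [contains_category_alt, bCore]
  rw [pvBestLoop_eq_bestC, hcats]
  set catsC := ((pvCats category).map String.toList).filter (fun c => decide ('\n' ∉ c)) with hC
  by_cases hb : bestC text.toList catsC (-1) = -1
  · rw [if_pos hb, if_pos hb]
    rfl
  · have hge : 0 ≤ bestC text.toList catsC (-1) := by
      rcases bestC_spec text.toList catsC with ⟨h1, _⟩ | ⟨h1, _⟩
      · exact absurd h1 hb
      · exact h1
    rw [if_neg hb, if_neg hb]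
    have hidx : PySem.Str.count (PySem.Str.slice text none (some (bestC text.toList catsC (-1)))) "\n"
        = (text.toList.take (bestC text.toList catsC (-1)).toNat).count '\n' := by
      rw [PySem.Str.count_eq, PySem.Str.toList_slice, PySem.Chars.slice_eq_listSlice,
        PySem.List.slice_to _ hge, show "\n".toList = ['\n'] from by decide, count_single]
    rw [hidx, lines_eq, pyGet?_map_ofList]
    cases PySem.List.pyGet? (nlSplit text.toList)
        (((text.toList.take (bestC text.toList catsC (-1)).toNat).count '\n' : Int) + 1) with
    | none => rfl
    | some v => simp [strip_ofList]

-- ===== VERDICT (by name: the statement is the Claim_ definition above) =====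
theorem contains_category_spec : Claim_equal_contains_category := by
  intro text category _ _
  unfold Spec_contains_category
  have hA : contains_category text category = midS (pvCats category) (pvLines text) := by
    unfold contains_category
    exact loopA_eq_midS _ _ _ 0 rfl
  rw [hA, alt_eq_bCore, midS_eq_midC, lines_eq]
  have hmap : (((nlSplit text.toList).map String.ofList).map String.toList) = nlSplit text.toList := by
    simp [List.map_map, Function.comp_def]
  rw [hmap]
  have hfree : ∀ l ∈ nlSplit text.toList, '\n' ∉ l := fun l hl => mem_nlSplit_no_nl _ _ hl
  rw [midC_filter _ _ hfree]
  rw [bCore_eq_midC]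
  intro c hc
  simp only [List.mem_filter, decide_eq_true_eq] at hc
  exact hc.2
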